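-- pv_equiv track=rewrite | github.com/SmritiVM/Advent-of-Code-2023 | 13/13 copy 2.py | summarize_notes
-- ===== SOURCE A (Python) =====
-- def summarize_notes(PATTERNS):
--     #LOR => line of reflection
--     #Find total no. of vertical and horizontal LORs
--     vertical = horizontal = 0
--     sum = 0
--     for pattern in PATTERNS:
--         horizontal = find_horizontal_mirror(pattern, smudges=1)
--         vertical = find_vertical_mirror(pattern, smudges=1)
--         sum += vertical + 100 * horizontal
--     return sum
--
-- def find_horizontal_mirror(pattern, smudges=0):
--     for i, line in enumerate(pattern):
--         if i + 1 == len(pattern): return 0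
--         pairs_to_check = [(c1, c2) for line1, line2 in zip(pattern[i::-1], pattern[i+1:])
--                           for c1, c2 in zip(line1, line2)]
--         if sum(1 for c1,c2 in pairs_to_check if c1 == c2) == len(pairs_to_check) - smudges:
--             return i + 1
--
-- def find_vertical_mirror(pattern, smudges=0):
--     transpose = list(zip(*pattern))
--     return find_horizontal_mirror(transpose, smudges)
-- ===== SOURCE B (Python) =====
-- def _row_diff(r1, r2):
--     return sum(1 for c1, c2 in zip(r1, r2) if c1 != c2)
--
-- def _find_mirror(pattern, smudges):
--     # Classify every row pair (a, b), a < b, by the reflection axis it witnesses: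
--     # an odd-sum pair belongs to the candidate line i = (a + b - 1) // 2.
--     # One sweep over all pairs fills the per-axis mismatch totals; then scan them.
--     n = len(pattern)
--     if n == 0:
--         return None  # no rows: no mirror line exists
--     totals = [0] * (n - 1)
--     for b in range(n):
--         for a in range(b):
--             if (a + b) % 2 == 1:
--                 totals[(a + b - 1) // 2] += _row_diff(pattern[a], pattern[b])
--     for i, t in enumerate(totals):
--         if t == smudges:
--             return i + 1
--     return 0
--
-- def summarize_notes(PATTERNS):
--     result = 0
--     for pattern in PATTERNS:
--         result += 100 * _find_mirror(pattern, 1) + _find_mirror(list(zip(*pattern)), 1)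
--     return result
-- ===== Notes on version B (the rewrite author's own statement) =====
-- stated objective: alternative
-- what changed: Instead of A's per-candidate loop that rebuilds and compares the mirrored half via slicing/zipping, B makes one sweep over all unordered row pairs, classifying each odd-sum pair (a,b) into the mismatch total of the reflection axis i=(a+b-1)//2 it witnesses, and then scans the totals array for the first axis whose total equals the smudge count.
import Mathlib
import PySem

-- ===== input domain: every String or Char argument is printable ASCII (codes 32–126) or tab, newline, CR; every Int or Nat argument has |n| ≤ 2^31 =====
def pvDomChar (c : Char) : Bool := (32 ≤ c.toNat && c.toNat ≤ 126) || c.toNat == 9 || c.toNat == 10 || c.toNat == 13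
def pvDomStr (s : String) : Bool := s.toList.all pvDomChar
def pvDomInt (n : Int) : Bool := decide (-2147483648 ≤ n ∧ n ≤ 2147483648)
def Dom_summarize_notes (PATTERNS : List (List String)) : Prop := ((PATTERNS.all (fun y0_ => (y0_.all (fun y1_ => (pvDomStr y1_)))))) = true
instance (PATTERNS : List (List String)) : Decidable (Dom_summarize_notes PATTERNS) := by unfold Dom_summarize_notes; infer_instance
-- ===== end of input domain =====

-- B replaces A's per-candidate slice/zip mirror check by one sweep over all unordered row
-- pairs, bucketing each odd-sum pair into the mismatch total of the reflection axis it
-- witnesses, then scanning the totals (alternative decomposition, not claimed faster).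

-- ===== PORT A =====

-- shared helper: Python's list(zip(*pattern)) — columns truncated to the shortest row
-- (exact: every produced index j is < each row's length, so getD never defaults)
def pvMinLen (rows : List (List Char)) : Nat :=
  match rows with
  | [] => 0
  | r :: rs => rs.foldl (fun m x => min m x.length) r.length

def pvZipStar (rows : List (List Char)) : List (List Char) :=
  (List.range (pvMinLen rows)).map (fun j => rows.map (fun r => r.getD j ' '))

-- sum(1 for c1,c2 in pairs_to_check if c1 == c2)
def pvCountEqA (ps : List (Char × Char)) : Int :=
  ps.foldl (fun acc p => if p.1 = p.2 then acc + 1 else acc) 0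

-- find_horizontal_mirror: loop over i = 0,1,…  (pattern[i::-1] = (take (i+1)).reverse, pattern[i+1:] = drop (i+1))
def pvFindHA_go (pattern : List (List Char)) (smudges : Int) (i : Nat) : Option Int :=
  if _h : i < pattern.length then
    if i + 1 = pattern.length then some 0
    else
      let pairs := ((pattern.take (i+1)).reverse.zip (pattern.drop (i+1))).flatMap
                     (fun lp => lp.1.zip lp.2)
      if pvCountEqA pairs = (pairs.length : Int) - smudges then some ((i : Int) + 1)
      else pvFindHA_go pattern smudges (i+1)
  else none   -- loop falls through: Python returns None
termination_by pattern.length - i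

def pvFindHA (pattern : List (List Char)) (smudges : Int) : Option Int :=
  pvFindHA_go pattern smudges 0

def summarize_notes (PATTERNS : List (List String)) : Int :=
  PATTERNS.foldl (fun s pattern =>
    let pat := pattern.map String.toList
    let horizontal := pvFindHA pat 1
    let vertical := pvFindHA (pvZipStar pat) 1
    -- when either is none Python raises TypeError (None + int); those inputs are outside Pre_,
    -- so the getD 0 default is never reached under the claim
    s + (vertical.getD 0 + 100 * horizontal.getD 0)) 0

-- ===== PORT B =====

-- sum(1 for c1, c2 in zip(r1, r2) if c1 != c2)
def pvRowDiffB (r1 r2 : List Char) : Int :=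
  (r1.zip r2).foldl (fun acc p => if p.1 ≠ p.2 then acc + 1 else acc) 0

-- the two nested for-loops of _find_mirror filling the per-axis totals
def pvTotalsB (pattern : List (List Char)) (n : Nat) : List Int :=
  (List.range n).foldl (fun tot b =>
    (List.range b).foldl (fun tot a =>
      if (a + b) % 2 = 1 then
        tot.set ((a + b - 1) / 2)
          (tot.getD ((a + b - 1) / 2) 0 + pvRowDiffB (pattern.getD a []) (pattern.getD b []))
      else tot) tot)
    (List.replicate (n - 1) 0)

-- for i, t in enumerate(totals): if t == smudges: return i + 1 ; return 0
def pvScanB (smudges : Int) : List Int → Nat → Int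
  | [], _ => 0
  | t :: ts, i => if t = smudges then (i : Int) + 1 else pvScanB smudges ts (i + 1)

def pvFindMB (pattern : List (List Char)) (smudges : Int) : Option Int :=
  if pattern.length = 0 then none   -- no rows: no mirror line exists
  else some (pvScanB smudges (pvTotalsB pattern pattern.length) 0)

def summarize_notes_alt (PATTERNS : List (List String)) : Int :=
  PATTERNS.foldl (fun result pattern =>
    -- when either search returns None Python raises TypeError (None in the sum); those inputs
    -- are outside Pre_, so the getD 0 default is never reached under the claim
    result + (100 * (pvFindMB (pattern.map String.toList) 1).getD 0 +
              (pvFindMB (pvZipStar (pattern.map String.toList)) 1).getD 0)) 0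

-- ===== PRECONDITION & SPEC =====
-- Pre_ excludes exactly the inputs where A raises TypeError: a pattern with no rows, or with an
-- empty row (then the pattern or its transpose is empty, the mirror search returns None, and None + int raises).
def Pre_summarize_notes (PATTERNS : List (List String)) : Prop :=
  ∀ p ∈ PATTERNS, p ≠ [] ∧ ∀ r ∈ p, r ≠ ""
instance (PATTERNS : List (List String)) : Decidable (Pre_summarize_notes PATTERNS) := by
  unfold Pre_summarize_notes; infer_instance

def pvWitness_summarize_notes : List (List String) := [["#.", "#.", "##"], ["..", ".."]]

def Spec_summarize_notes (PATTERNS : List (List String)) (out : Int) : Prop := out = summarize_notes_alt PATTERNS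
instance (PATTERNS : List (List String)) (out : Int) : Decidable (Spec_summarize_notes PATTERNS out) := by unfold Spec_summarize_notes; infer_instance

-- ===== CLAIM (what is proved, stated in full; the proofs are below) =====
def Claim_equal_summarize_notes : Prop := ∀ (PATTERNS : List (List String)), Dom_summarize_notes PATTERNS → Pre_summarize_notes PATTERNS → Spec_summarize_notes PATTERNS (summarize_notes PATTERNS)

-- ===== LEMMAS AND PROOFS =====

-- the list of row pairs A compares for candidate line i
def pvRPairs (pat : List (List Char)) (i : Nat) : List (List Char × List Char) :=
  (pat.take (i+1)).reverse.zip (pat.drop (i+1))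

-- total mismatches over a list of row pairs
def pvMismSum (l : List (List Char × List Char)) : Int :=
  (l.map (fun p => pvRowDiffB p.1 p.2)).sum

-- mismatch count of a ready-made pair list (pvRowDiffB r1 r2 = pvNeC (r1.zip r2) definitionally)
def pvNeC (ps : List (Char × Char)) : Int :=
  ps.foldl (fun acc p => if p.1 ≠ p.2 then acc + 1 else acc) 0

theorem pvCountEqA_shift (ps : List (Char × Char)) (a : Int) :
    ps.foldl (fun acc p => if p.1 = p.2 then acc + 1 else acc) a = a + pvCountEqA ps := by
  induction ps generalizing a with
  | nil => simp [pvCountEqA]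
  | cons p ps ih =>
    simp only [pvCountEqA, List.foldl_cons]
    rw [ih, ih]
    split <;> ring

theorem pvNeC_shift (ps : List (Char × Char)) (a : Int) :
    ps.foldl (fun acc p => if p.1 ≠ p.2 then acc + 1 else acc) a = a + pvNeC ps := by
  induction ps generalizing a with
  | nil => simp [pvNeC]
  | cons p ps ih =>
    simp only [pvNeC, List.foldl_cons]
    rw [ih, ih]
    split <;> ring

theorem pvCountEqA_append (xs ys : List (Char × Char)) :
    pvCountEqA (xs ++ ys) = pvCountEqA xs + pvCountEqA ys := by
  simp only [pvCountEqA, List.foldl_append]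
  rw [pvCountEqA_shift]
  simp [pvCountEqA]

theorem pvCountEqA_cons (p : Char × Char) (ps : List (Char × Char)) :
    pvCountEqA (p :: ps) = (if p.1 = p.2 then 1 else 0) + pvCountEqA ps := by
  simp only [pvCountEqA, List.foldl_cons]
  rw [pvCountEqA_shift]
  split <;> simp [pvCountEqA]

theorem pvNeC_cons (p : Char × Char) (ps : List (Char × Char)) :
    pvNeC (p :: ps) = (if p.1 ≠ p.2 then 1 else 0) + pvNeC ps := by
  simp only [pvNeC, List.foldl_cons]
  rw [pvNeC_shift]
  split <;> simp [pvNeC]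

theorem pvCountEqA_add_pvNeC (ps : List (Char × Char)) :
    pvCountEqA ps + pvNeC ps = (ps.length : Int) := by
  induction ps with
  | nil => simp [pvCountEqA, pvNeC]
  | cons p ps ih =>
    rw [pvCountEqA_cons, pvNeC_cons, List.length_cons]
    split_ifs with h1 h2
    · exact absurd h1 h2
    all_goals push_cast
    all_goals linarith

theorem pvRowDiffB_eq_pvNeC (r1 r2 : List Char) : pvRowDiffB r1 r2 = pvNeC (r1.zip r2) := rfl

theorem pvCountEqA_flatMap (L : List (List Char × List Char)) :
    pvCountEqA (L.flatMap (fun lp => lp.1.zip lp.2)) =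
      ((L.flatMap (fun lp => lp.1.zip lp.2)).length : Int) - pvMismSum L := by
  induction L with
  | nil => simp [pvCountEqA, pvMismSum]
  | cons p L ih =>
    simp only [List.flatMap_cons, List.length_append, pvMismSum, List.map_cons, List.sum_cons]
    rw [pvCountEqA_append, pvRowDiffB_eq_pvNeC]
    have h2 := pvCountEqA_add_pvNeC (p.1.zip p.2)
    simp only [pvMismSum] at ih
    push_cast
    linarith [ih]

theorem pvRPairs_length (pat : List (List Char)) (i : Nat) (hi : i + 1 ≤ pat.length) :
    (pvRPairs pat i).length = min (i+1) (pat.length - (i+1)) := by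
  simp only [pvRPairs, List.length_zip, List.length_reverse, List.length_take, List.length_drop]
  omega

theorem pvRPairs_getElem (pat : List (List Char)) (i k : Nat)
    (hi : i + 1 ≤ pat.length) (hk : k < (pvRPairs pat i).length) :
    (pvRPairs pat i)[k]'hk = (pat.getD (i-k) [], pat.getD (i+1+k) []) := by
  have hlen : (pvRPairs pat i).length = min (i+1) (pat.length - (i+1)) :=
    pvRPairs_length pat i hi
  have e1 : i - k < pat.length := by omega
  have e2 : i + 1 + k < pat.length := by omega
  simp only [pvRPairs, List.getElem_zip, List.getElem_reverse, List.getElem_take,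
    List.getElem_drop, List.length_take]
  rw [List.getD_eq_getElem pat [] e1, List.getD_eq_getElem pat [] e2]
  have hk' : k < (pvRPairs pat i).length := hk
  rw [hlen] at hk'
  congr 2
  all_goals omega

-- pvRPairs as a range map (for the sum comparison)
theorem pvRPairs_eq_range_map (pat : List (List Char)) (i : Nat) (hi : i + 1 ≤ pat.length) :
    pvRPairs pat i = (List.range (min (i+1) (pat.length - (i+1)))).map
      (fun k => (pat.getD (i-k) [], pat.getD (i+1+k) [])) := by
  apply List.ext_getElem
  · rw [pvRPairs_length pat i hi]; simp
  · intro k h1 h2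
    rw [pvRPairs_getElem pat i k hi h1]
    simp

-- list range-map sums as Finset sums
theorem pvListSum_range (n : Nat) (f : Nat → Int) :
    ((List.range n).map f).sum = ∑ x ∈ Finset.range n, f x := by
  induction n with
  | zero => simp
  | succ n ih => rw [List.range_succ, Finset.sum_range_succ, List.map_append, List.sum_append, ih]; simp

-- map-sum distributes over flatMap
theorem pvSum_flatMap {α β : Type} (l : List α) (g : α → List β) (f : β → Int) :
    ((l.flatMap g).map f).sum = (l.map (fun b => ((g b).map f).sum)).sum := by
  induction l with
  | nil => simp
  | cons a l ih => simp [List.flatMap_cons, ih]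

-- ---- the bucket accumulation lemma for B's pair sweep ----

def pvStep (d : Nat → Nat → Int) (tot : List Int) (p : Nat × Nat) : List Int :=
  if (p.1 + p.2) % 2 = 1 then
    tot.set ((p.1 + p.2 - 1) / 2) (tot.getD ((p.1 + p.2 - 1) / 2) 0 + d p.1 p.2)
  else tot

theorem pvStep_length (d : Nat → Nat → Int) (tot : List Int) (p : Nat × Nat) :
    (pvStep d tot p).length = tot.length := by
  unfold pvStep; split <;> simp

theorem pvFoldStep_length (d : Nat → Nat → Int) (L : List (Nat × Nat)) :
    ∀ tot : List Int, (L.foldl (pvStep d) tot).length = tot.length := by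
  induction L with
  | nil => intro tot; rfl
  | cons p L ih => intro tot; rw [List.foldl_cons, ih, pvStep_length]

theorem pvGetD_set (l : List Int) (j i : Nat) (x : Int) (hj : j < l.length) :
    (l.set j x).getD i 0 = if j = i then x else l.getD i 0 := by
  rw [List.getD_eq_getElem?_getD, List.getD_eq_getElem?_getD, List.getElem?_set]
  split
  · simp
  · rfl

theorem pvBucket (d : Nat → Nat → Int) (L : List (Nat × Nat)) :
    ∀ tot : List Int, (∀ p ∈ L, (p.1 + p.2) % 2 = 1 → (p.1 + p.2 - 1) / 2 < tot.length) →
    ∀ i : Nat,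
      (L.foldl (pvStep d) tot).getD i 0 =
        tot.getD i 0 + (L.map (fun p => if p.1 + p.2 = 2*i+1 then d p.1 p.2 else 0)).sum := by
  induction L with
  | nil => intro tot _ i; simp
  | cons p L ih =>
    intro tot hlt i
    rw [List.foldl_cons, List.map_cons, List.sum_cons]
    have hlt' : ∀ q ∈ L, (q.1 + q.2) % 2 = 1 → (q.1 + q.2 - 1) / 2 < (pvStep d tot p).length := by
      intro q hq h; rw [pvStep_length]; exact hlt q (List.mem_cons_of_mem p hq) h
    rw [ih (pvStep d tot p) hlt' i]
    unfold pvStep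
    by_cases hodd : (p.1 + p.2) % 2 = 1
    · rw [if_pos hodd]
      have hj : (p.1 + p.2 - 1) / 2 < tot.length := hlt p List.mem_cons_self hodd
      rw [pvGetD_set tot _ i _ hj]
      by_cases heq : (p.1 + p.2 - 1) / 2 = i
      · rw [if_pos heq, if_pos (by omega), heq]; ring
      · rw [if_neg heq, if_neg (by omega)]; ring
    · rw [if_neg hodd, if_neg (by omega)]; ring

-- the nested loops of pvTotalsB are the pair sweep over the flattened pair list
theorem pvTotalsB_eq_fold (pat : List (List Char)) (n : Nat) :
    pvTotalsB pat n =
      ((List.range n).flatMap (fun b => (List.range b).map (fun a => (a, b)))).foldl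
        (pvStep (fun a b => pvRowDiffB (pat.getD a []) (pat.getD b []))) (List.replicate (n-1) 0) := by
  rw [List.foldl_flatMap]
  unfold pvTotalsB
  apply PySem.List.foldl_congr_mem
  intro tot b _
  rw [List.foldl_map]
  rfl

-- every bucket index produced by the pair list is in range
theorem pvPairs_bucket_lt (n : Nat) :
    ∀ p ∈ (List.range n).flatMap (fun b => (List.range b).map (fun a => (a, b))),
      (p.1 + p.2) % 2 = 1 → (p.1 + p.2 - 1) / 2 < (List.replicate (n-1) (0:Int)).length := by
  intro p hp _
  simp only [List.mem_flatMap, List.mem_range, List.mem_map] at hp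
  obtain ⟨b, hb, a, ha, rfl⟩ := hp
  simp only [List.length_replicate]
  omega

-- the bucket total at axis i is A's mirror mismatch count at i
theorem pvTotalsB_getD (pat : List (List Char)) (i : Nat) (hi : i + 1 < pat.length) :
    (pvTotalsB pat pat.length).getD i 0 = pvMismSum (pvRPairs pat i) := by
  set n := pat.length with hn
  set d : Nat → Nat → Int := fun a b => pvRowDiffB (pat.getD a []) (pat.getD b []) with hd
  rw [pvTotalsB_eq_fold]
  rw [pvBucket d _ _ (pvPairs_bucket_lt n) i]
  rw [List.getD_replicate _ (by omega)]
  -- left: sum over flattened pairs of the bucket filter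
  have hflat : (((List.range n).flatMap (fun b => (List.range b).map (fun a => (a, b)))).map
      ((fun p : Nat × Nat => if p.1 + p.2 = 2*i+1 then d p.1 p.2 else 0))).sum =
      ((List.range n).map (fun b =>
        (((List.range b).map (fun a => (a, b))).map
          (fun p : Nat × Nat => if p.1 + p.2 = 2*i+1 then d p.1 p.2 else 0)).sum)).sum := by
    exact pvSum_flatMap _ _ _
  rw [hflat, pvListSum_range]
  simp only [List.map_map]
  -- evaluate the inner sums
  have hinner : ∀ b < n, (((List.range b).map
        (fun a => if a + b = 2*i+1 then d a b else 0))).sum =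
      if i+1 ≤ b ∧ b < 2*i+2 then d (2*i+1-b) b else 0 := by
    intro b _
    rw [pvListSum_range]
    by_cases hb : i+1 ≤ b ∧ b < 2*i+2
    · rw [if_pos hb]
      have hsingle : (∑ x ∈ Finset.range b, if x + b = 2*i+1 then d x b else 0) =
          if (2*i+1-b) + b = 2*i+1 then d (2*i+1-b) b else 0 := by
        apply Finset.sum_eq_single_of_mem
        · simp only [Finset.mem_range]; omega
        · intro a _ hne
          rw [if_neg (by omega)]
      rw [hsingle, if_pos (by omega)]
    · rw [if_neg hb]
      apply Finset.sum_eq_zero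
      intro a ha
      simp only [Finset.mem_range] at ha
      rw [if_neg (by omega)]
  have hcongr : ∑ b ∈ Finset.range n,
        ((List.range b).map ((fun p : Nat × Nat => if p.1 + p.2 = 2*i+1 then d p.1 p.2 else 0) ∘
          fun a => (a, b))).sum =
      ∑ b ∈ Finset.range n, (if i+1 ≤ b ∧ b < 2*i+2 then d (2*i+1-b) b else 0) := by
    apply Finset.sum_congr rfl
    intro b hb
    simp only [Finset.mem_range] at hb
    simpa [Function.comp_def] using hinner b hb

  rw [hcongr]
  -- collapse the guarded sum to an Ico, then to a range sum
  have hico : ∑ b ∈ Finset.range n, (if i+1 ≤ b ∧ b < 2*i+2 then d (2*i+1-b) b else 0) =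
      ∑ b ∈ Finset.Ico (i+1) (min (2*i+2) n), d (2*i+1-b) b := by
    rw [← Finset.sum_filter]
    apply Finset.sum_congr
    · ext b
      simp only [Finset.mem_filter, Finset.mem_range, Finset.mem_Ico]
      omega
    · intro b _; rfl
  rw [hico, Finset.sum_Ico_eq_sum_range]
  -- right: pvMismSum over the range-map form of pvRPairs
  rw [pvMismSum, pvRPairs_eq_range_map pat i (by omega), List.map_map, pvListSum_range]
  have hK : min (2*i+2) n - (i+1) = min (i+1) (n - (i+1)) := by omega
  rw [hK, zero_add]
  apply Finset.sum_congr rfl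
  intro k hk
  simp only [Finset.mem_range] at hk
  simp only [Function.comp_apply]
  have h1 : 2*i+1 - (i+1+k) = i - k := by omega
  rw [h1]

theorem pvTotalsB_length (pat : List (List Char)) :
    (pvTotalsB pat pat.length).length = pat.length - 1 := by
  rw [pvTotalsB_eq_fold, pvFoldStep_length]
  simp

-- both searches agree from any start index, for a nonempty pattern
theorem pvGo_eq (pat : List (List Char)) (s : Int) (hne : pat ≠ []) :
    ∀ m i, pat.length - i ≤ m → i ≤ pat.length - 1 →
      pvFindHA_go pat s i = some (pvScanB s ((pvTotalsB pat pat.length).drop i) i) := by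
  have hn1 : 1 ≤ pat.length := by
    cases pat with
    | nil => exact absurd rfl hne
    | cons a l => simp
  intro m
  induction m with
  | zero =>
    intro i hm hi
    omega
  | succ m ih =>
    intro i hm hi
    have hin : i < pat.length := by omega
    rw [pvFindHA_go, dif_pos hin]
    by_cases hlast : i + 1 = pat.length
    · rw [if_pos hlast]
      have : (pvTotalsB pat pat.length).drop i = [] := by
        apply List.drop_eq_nil_of_le
        rw [pvTotalsB_length]; omega
      rw [this]
      rfl
    · have hi1 : i + 1 < pat.length := by omega
      have hidx : i < (pvTotalsB pat pat.length).length := by rw [pvTotalsB_length]; omega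
      rw [if_neg hlast]
      rw [List.drop_eq_getElem_cons hidx]
      have hget : (pvTotalsB pat pat.length)[i]'hidx = pvMismSum (pvRPairs pat i) := by
        rw [← pvTotalsB_getD pat i hi1, List.getD_eq_getElem _ _ hidx]
      have hcnt := pvCountEqA_flatMap (pvRPairs pat i)
      simp only [pvRPairs] at hcnt
      simp only [pvScanB, hget]
      by_cases hcond : pvMismSum (pvRPairs pat i) = s
      · rw [if_pos hcond,
            if_pos (show pvCountEqA (((pat.take (i+1)).reverse.zip (pat.drop (i+1))).flatMap
                (fun lp => lp.1.zip lp.2)) =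
              ((((pat.take (i+1)).reverse.zip (pat.drop (i+1))).flatMap
                (fun lp => lp.1.zip lp.2)).length : Int) - s by
              simp only [pvRPairs] at hcond; omega)]
      · rw [if_neg hcond,
            if_neg (show ¬ pvCountEqA (((pat.take (i+1)).reverse.zip (pat.drop (i+1))).flatMap
                (fun lp => lp.1.zip lp.2)) =
              ((((pat.take (i+1)).reverse.zip (pat.drop (i+1))).flatMap
                (fun lp => lp.1.zip lp.2)).length : Int) - s by
              simp only [pvRPairs] at hcond; omega)]
        exact ih (i+1) (by omega) (by omega)

theorem pvFindHA_eq (pat : List (List Char)) (s : Int) (hne : pat ≠ []) :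
    pvFindHA pat s = pvFindMB pat s := by
  have h1 : 1 ≤ pat.length := by
    cases pat with
    | nil => exact absurd rfl hne
    | cons a l => simp
  unfold pvFindMB
  rw [if_neg (by omega)]
  exact pvGo_eq pat s hne pat.length 0 (by omega) (by omega)

-- the transpose of a nonempty pattern with nonempty rows is nonempty
theorem pvMinLen_pos (pat : List (List Char)) (hne : pat ≠ []) (hrows : ∀ r ∈ pat, r ≠ []) :
    0 < pvMinLen pat := by
  cases pat with
  | nil => exact absurd rfl hne
  | cons r rs =>
    unfold pvMinLen
    have hr : 0 < r.length := by
      have := hrows r List.mem_cons_self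
      cases r with
      | nil => exact absurd rfl this
      | cons c cs => simp
    have : ∀ (l : List (List Char)), (∀ x ∈ l, x ≠ []) → ∀ m, 0 < m →
        0 < l.foldl (fun m x => min m x.length) m := by
      intro l
      induction l with
      | nil => intro _ m hm; exact hm
      | cons x xs ih =>
        intro hx m hm
        rw [List.foldl_cons]
        apply ih (fun y hy => hx y (List.mem_cons_of_mem x hy))
        have : 0 < x.length := by
          have := hx x List.mem_cons_self
          cases x with
          | nil => exact absurd rfl this
          | cons c cs => simp
        omega
    exact this rs (fun y hy => hrows y (List.mem_cons_of_mem r hy)) r.length hr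

theorem pvZipStar_ne_nil (pat : List (List Char)) (hne : pat ≠ []) (hrows : ∀ r ∈ pat, r ≠ []) :
    pvZipStar pat ≠ [] := by
  unfold pvZipStar
  have := pvMinLen_pos pat hne hrows
  intro h
  rw [List.map_eq_nil_iff, List.range_eq_nil] at h
  omega

-- ===== VERDICT (by name: the statement is the Claim_ definition above) =====
theorem summarize_notes_spec : Claim_equal_summarize_notes := by
  intro P _ hpre
  unfold Spec_summarize_notes summarize_notes summarize_notes_alt
  apply PySem.List.foldl_congr_mem
  intro acc pattern hmem
  obtain ⟨hp, hr⟩ := hpre pattern hmem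
  have hne : pattern.map String.toList ≠ [] := by
    intro h; rw [List.map_eq_nil_iff] at h; exact hp h
  have hrows : ∀ r ∈ pattern.map String.toList, r ≠ [] := by
    intro r hrm
    rw [List.mem_map] at hrm
    obtain ⟨s, hs, rfl⟩ := hrm
    intro h
    exact hr s hs (String.toList_eq_nil_iff.mp h)
  have h1 := pvFindHA_eq (pattern.map String.toList) 1 hne
  have h2 := pvFindHA_eq (pvZipStar (pattern.map String.toList)) 1
    (pvZipStar_ne_nil _ hne hrows)
  simp only [h1, h2]
  ring
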